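-- pv_equiv track=rewrite | github.com/aj47/snackbot-harness-demo | strategy.py | blocked_crossings
-- ===== SOURCE A (Python) =====
-- def blocked_crossings(a, b, blocked):
--     x, y = a
--     bx, by = b
--     hits = 0
--
--     step_x = 1 if bx >= x else -1
--     while x != bx:
--         x += step_x
--         if (x, y) in blocked:
--             hits += 1
--
--     step_y = 1 if by >= y else -1
--     while y != by:
--         y += step_y
--         if (x, y) in blocked:
--             hits += 1
--
--     return hits
-- ===== SOURCE B (Python) =====
-- def blocked_crossings(a, b, blocked):
--     x, y = a
--     bx, by = b
--     lo_x, hi_x = min(x, bx), max(x, bx)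
--     lo_y, hi_y = min(y, by), max(y, by)
--     hits = 0
--     for (px, py) in set(blocked):
--         if py == y and lo_x <= px <= hi_x and px != x:
--             hits += 1
--         elif px == bx and lo_y <= py <= hi_y and py != y:
--             hits += 1
--     return hits
-- ===== Notes on version B (the rewrite author's own statement) =====
-- stated objective: faster
-- what changed: Instead of walking the L-shaped path cell by cell and testing each cell's membership in the blocked list, B makes one pass over set(blocked) and tests each blocked cell against the two segment ranges with interval comparisons.
import Mathlib
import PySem

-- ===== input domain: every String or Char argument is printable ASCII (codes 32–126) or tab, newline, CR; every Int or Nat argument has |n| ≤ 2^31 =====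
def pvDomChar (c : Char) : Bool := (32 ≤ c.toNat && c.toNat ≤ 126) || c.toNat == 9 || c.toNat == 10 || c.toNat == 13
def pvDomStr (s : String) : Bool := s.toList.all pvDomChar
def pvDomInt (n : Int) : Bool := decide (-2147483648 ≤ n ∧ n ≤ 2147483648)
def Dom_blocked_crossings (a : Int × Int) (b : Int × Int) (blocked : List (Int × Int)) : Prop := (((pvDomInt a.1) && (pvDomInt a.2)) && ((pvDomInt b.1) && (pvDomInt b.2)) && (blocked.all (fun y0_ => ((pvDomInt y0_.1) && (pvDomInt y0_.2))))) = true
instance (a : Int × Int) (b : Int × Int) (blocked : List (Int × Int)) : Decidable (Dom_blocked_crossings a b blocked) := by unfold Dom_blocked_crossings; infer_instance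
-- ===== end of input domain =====

-- B replaces A's cell-by-cell walk along the L-path (O((dx+dy)·|blocked|)) by a single
-- pass over set(blocked) testing each blocked cell against the two segment ranges (O(|blocked|^2) dedup + O(|blocked|)).

-- ===== PORT A =====
-- first while loop: walk x toward bx, counting blocked cells; returns final x and hits
def pvLoopX : Nat → Int → Int → Int → List (Int × Int) → Int → Int × Int
  | 0, x, _, _, _, hits => (x, hits)
  | n+1, x, y, step, blocked, hits =>
      let x' := x + step
      pvLoopX n x' y step blocked (if (x', y) ∈ blocked then hits + 1 else hits)

-- second while loop: walk y toward by, counting blocked cells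
def pvLoopY : Nat → Int → Int → Int → List (Int × Int) → Int → Int
  | 0, _, _, _, _, hits => hits
  | n+1, y, x, step, blocked, hits =>
      let y' := y + step
      pvLoopY n y' x step blocked (if (x, y') ∈ blocked then hits + 1 else hits)

def blocked_crossings (a : Int × Int) (b : Int × Int) (blocked : List (Int × Int)) : Int :=
  let x := a.1
  let y := a.2
  let bx := b.1
  let b_y := b.2
  let step_x : Int := if bx ≥ x then 1 else -1
  let r := pvLoopX (bx - x).natAbs x y step_x blocked 0
  let step_y : Int := if b_y ≥ y then 1 else -1
  pvLoopY (b_y - y).natAbs y r.1 step_y blocked r.2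

-- ===== PORT B =====
def blocked_crossings_alt (a : Int × Int) (b : Int × Int) (blocked : List (Int × Int)) : Int :=
  let x := a.1
  let y := a.2
  let bx := b.1
  let b_y := b.2
  let lo_x := min x bx
  let hi_x := max x bx
  let lo_y := min y b_y
  let hi_y := max y b_y
  (PySem.Set.ofList blocked).foldl (fun hits z =>
      if z.2 = y ∧ lo_x ≤ z.1 ∧ z.1 ≤ hi_x ∧ z.1 ≠ x then hits + 1
      else if z.1 = bx ∧ lo_y ≤ z.2 ∧ z.2 ≤ hi_y ∧ z.2 ≠ y then hits + 1
      else hits) 0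

-- ===== PRECONDITION & SPEC =====
def Spec_blocked_crossings (a : Int × Int) (b : Int × Int) (blocked : List (Int × Int)) (out : Int) : Prop := out = blocked_crossings_alt a b blocked
instance (a : Int × Int) (b : Int × Int) (blocked : List (Int × Int)) (out : Int) : Decidable (Spec_blocked_crossings a b blocked out) := by unfold Spec_blocked_crossings; infer_instance

-- ===== CLAIM (what is proved, stated in full; the proofs are below) =====
def Claim_equal_blocked_crossings : Prop := ∀ (a : Int × Int) (b : Int × Int) (blocked : List (Int × Int)), Dom_blocked_crossings a b blocked → Spec_blocked_crossings a b blocked (blocked_crossings a b blocked)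

-- ===== LEMMAS AND PROOFS =====

-- the cells visited by a walk of n steps of size `step` starting just after s
def pathCells (s step : Int) : Nat → List Int
  | 0 => []
  | n+1 => (s + step) :: pathCells (s + step) step n

theorem mem_pathCells_one (n : Nat) : ∀ (s c : Int), c ∈ pathCells s 1 n ↔ s < c ∧ c ≤ s + n := by
  induction n with
  | zero => intro s c; simp [pathCells]
  | succ m ih =>
      intro s c
      simp only [pathCells, List.mem_cons, ih]
      omega

theorem mem_pathCells_neg (n : Nat) : ∀ (s c : Int), c ∈ pathCells s (-1) n ↔ s - n ≤ c ∧ c < s := by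
  induction n with
  | zero => intro s c; simp [pathCells]
  | succ m ih =>
      intro s c
      simp only [pathCells, List.mem_cons, ih]
      omega

theorem nodup_pathCells_one (n : Nat) : ∀ (s : Int), (pathCells s 1 n).Nodup := by
  induction n with
  | zero => intro s; simp [pathCells]
  | succ m ih =>
      intro s
      simp only [pathCells, List.nodup_cons]
      refine ⟨fun h => ?_, ih _⟩
      rw [mem_pathCells_one] at h; omega

theorem nodup_pathCells_neg (n : Nat) : ∀ (s : Int), (pathCells s (-1) n).Nodup := by
  induction n with
  | zero => intro s; simp [pathCells]
  | succ m ih =>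
      intro s
      simp only [pathCells, List.nodup_cons]
      refine ⟨fun h => ?_, ih _⟩
      rw [mem_pathCells_neg] at h; omega

theorem pvLoopX_spec (n : Nat) : ∀ (x y step : Int) (blocked : List (Int × Int)) (hits : Int),
    pvLoopX n x y step blocked hits =
      (x + step * n, hits + ((pathCells x step n).countP (fun c => decide ((c, y) ∈ blocked)) : Int)) := by
  induction n with
  | zero => intro x y step blocked hits; simp [pvLoopX, pathCells]
  | succ m ih =>
      intro x y step blocked hits
      simp only [pvLoopX, pathCells, ih, List.countP_cons, Prod.mk.injEq]
      refine ⟨by push_cast; ring, ?_⟩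
      by_cases h : (x + step, y) ∈ blocked
      · simp only [h, decide_true, if_true]; push_cast; ring
      · simp only [h, decide_false, if_false]; push_cast; ring

theorem pvLoopY_spec (n : Nat) : ∀ (y x step : Int) (blocked : List (Int × Int)) (hits : Int),
    pvLoopY n y x step blocked hits =
      hits + ((pathCells y step n).countP (fun c => decide ((x, c) ∈ blocked)) : Int) := by
  induction n with
  | zero => intro y x step blocked hits; simp [pvLoopY, pathCells]
  | succ m ih =>
      intro y x step blocked hits
      simp only [pvLoopY, pathCells, ih, List.countP_cons]
      by_cases h : (x, y + step) ∈ blocked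
      · simp only [h, decide_true, if_true]; push_cast; ring
      · simp only [h, decide_false, if_false]; push_cast; ring

-- counting a disjunction splits when the disjuncts never hold together
theorem countP_or_disjoint {α : Type} (p q : α → Prop) [DecidablePred p] [DecidablePred q]
    (l : List α) (h : ∀ z, ¬ (p z ∧ q z)) :
    l.countP (fun z => decide (p z ∨ q z)) = l.countP (fun z => decide (p z)) + l.countP (fun z => decide (q z)) := by
  induction l with
  | nil => simp
  | cons a tl ih =>
      simp only [List.countP_cons, ih]
      have ha := h a
      by_cases hp : p a <;> by_cases hq : q a
      · exact absurd ⟨hp, hq⟩ ha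
      · simp [hp, hq]; omega
      · simp [hp, hq]; omega
      · simp [hp, hq]

theorem countP_mem_eq_card_inter {α : Type} [DecidableEq α] (D C : List α) (hD : D.Nodup) :
    D.countP (fun z => decide (z ∈ C)) = (D.toFinset ∩ C.toFinset).card := by
  induction D with
  | nil => simp
  | cons d tl ih =>
      simp only [List.nodup_cons] at hD
      obtain ⟨hd, htl⟩ := hD
      have hins : (d :: tl).toFinset = insert d tl.toFinset := by simp
      by_cases hdc : d ∈ C
      · rw [List.countP_cons]
        simp only [hdc, decide_true, ih htl, hins]
        rw [Finset.insert_inter_of_mem (by simpa using hdc),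
            Finset.card_insert_of_notMem (by simp [hd])]
        simp
      · rw [List.countP_cons]
        simp only [hdc, decide_false, ih htl, hins]
        rw [Finset.insert_inter_of_notMem (by simpa using hdc)]
        simp

-- countP is unchanged under a pointwise equivalent predicate (robust to differing Decidable instances)
theorem countP_iff_congr {α : Type} (l : List α) (p q : α → Bool) (h : ∀ a ∈ l, (p a = true ↔ q a = true)) :
    l.countP p = l.countP q :=
  List.countP_congr (fun a ha => by have := h a ha; revert this; cases p a <;> cases q a <;> simp)

-- the B-side fold is a countP of the disjunction of the two segment conditions
theorem foldl_body_countP (p q : (Int × Int) → Prop) [DecidablePred p] [DecidablePred q]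
    (l : List (Int × Int)) (h0 : Int) :
    l.foldl (fun hits z => if p z then hits + 1 else if q z then hits + 1 else hits) h0
      = h0 + (l.countP (fun z => decide (p z ∨ q z)) : Int) := by
  induction l generalizing h0 with
  | nil => simp
  | cons a tl ih =>
      simp only [List.foldl_cons, List.countP_cons, ih]
      by_cases hp : p a <;> by_cases hq : q a <;> simp [hp, hq] <;> ring

theorem blocked_crossings_spec_aux (a b : Int × Int) (blocked : List (Int × Int)) :
    blocked_crossings a b blocked = blocked_crossings_alt a b blocked := by
  obtain ⟨x, y⟩ := a
  obtain ⟨bx, b_y⟩ := b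
  simp only [blocked_crossings, blocked_crossings_alt]
  set sx : Int := if bx ≥ x then 1 else -1 with hsx
  set sy : Int := if b_y ≥ y then 1 else -1 with hsy
  set nx : Nat := (bx - x).natAbs with hnx
  set ny : Nat := (b_y - y).natAbs with hny
  rw [pvLoopX_spec, pvLoopY_spec]
  have hx1 : x + sx * nx = bx := by
    rw [hsx]; split_ifs with h <;> rw [hnx] <;> omega
  -- characterisations of the two walks' cells
  have hmemx : ∀ c : Int, c ∈ pathCells x sx nx ↔ (min x bx ≤ c ∧ c ≤ max x bx ∧ c ≠ x) := by
    intro c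
    rw [hsx]; split_ifs with h
    · rw [hnx, mem_pathCells_one]; omega
    · rw [hnx, mem_pathCells_neg]; omega
  have hmemy : ∀ c : Int, c ∈ pathCells y sy ny ↔ (min y b_y ≤ c ∧ c ≤ max y b_y ∧ c ≠ y) := by
    intro c
    rw [hsy]; split_ifs with h
    · rw [hny, mem_pathCells_one]; omega
    · rw [hny, mem_pathCells_neg]; omega
  have hnodupx : (pathCells x sx nx).Nodup := by
    rw [hsx]; split_ifs <;> [exact nodup_pathCells_one _ _; exact nodup_pathCells_neg _ _]
  have hnodupy : (pathCells y sy ny).Nodup := by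
    rw [hsy]; split_ifs <;> [exact nodup_pathCells_one _ _; exact nodup_pathCells_neg _ _]
  rw [hx1]
  -- rewrite B's fold as a countP over set(blocked)
  rw [foldl_body_countP (fun z => z.2 = y ∧ min x bx ≤ z.1 ∧ z.1 ≤ max x bx ∧ z.1 ≠ x)
        (fun z => z.1 = bx ∧ min y b_y ≤ z.2 ∧ z.2 ≤ max y b_y ∧ z.2 ≠ y)]
  rw [countP_or_disjoint _ _ _ (by rintro ⟨zx, zy⟩ ⟨⟨h1, _⟩, ⟨_, _, _, h2⟩⟩; exact h2 h1)]
  have hDf : (PySem.Set.ofList blocked).toFinset = blocked.toFinset := by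
    ext z; simp [List.mem_toFinset, PySem.Set.mem_ofList]
  -- horizontal part
  have hH : (pathCells x sx nx).countP (fun c => decide ((c, y) ∈ blocked)) =
      (PySem.Set.ofList blocked).countP
        (fun z => decide (z.2 = y ∧ min x bx ≤ z.1 ∧ z.1 ≤ max x bx ∧ z.1 ≠ x)) := by
    have hCn : (((pathCells x sx nx)).map (fun c => (c, y))).Nodup :=
      hnodupx.map (fun c₁ c₂ h => by simpa using congrArg Prod.fst h)
    have hmemC : ∀ z : Int × Int, z ∈ (pathCells x sx nx).map (fun c => (c, y)) ↔
        (z.2 = y ∧ min x bx ≤ z.1 ∧ z.1 ≤ max x bx ∧ z.1 ≠ x) := by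
      rintro ⟨zx, zy⟩
      simp only [List.mem_map, Prod.mk.injEq]
      constructor
      · rintro ⟨c, hc, h1, h2⟩
        subst h1; subst h2
        exact ⟨rfl, (hmemx c).mp hc⟩
      · rintro ⟨h1, h2⟩
        exact ⟨zx, (hmemx zx).mpr h2, rfl, h1.symm⟩
    have hmap : (pathCells x sx nx).countP (fun c => decide ((c, y) ∈ blocked)) =
        ((pathCells x sx nx).map (fun c => (c, y))).countP (fun z => decide (z ∈ blocked)) := by
      rw [List.countP_map]; rfl
    rw [hmap]
    have hright : (PySem.Set.ofList blocked).countP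
        (fun z => decide (z.2 = y ∧ min x bx ≤ z.1 ∧ z.1 ≤ max x bx ∧ z.1 ≠ x)) =
        ((PySem.Set.ofList blocked).toFinset ∩
          ((pathCells x sx nx).map (fun c => (c, y))).toFinset).card := by
      refine (countP_iff_congr _ _ _ ?_).trans
        (countP_mem_eq_card_inter (PySem.Set.ofList blocked)
          ((pathCells x sx nx).map (fun c => (c, y))) (PySem.Set.nodup_ofList _))
      intro z _
      simp only [decide_eq_true_eq]
      exact (hmemC z).symm
    rw [hright, hDf, Finset.inter_comm]
    refine (countP_iff_congr _ _ _ ?_).trans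
      (countP_mem_eq_card_inter _ blocked hCn)
    intro z _
    simp only [decide_eq_true_eq]
  -- vertical part
  have hV : (pathCells y sy ny).countP (fun c => decide ((bx, c) ∈ blocked)) =
      (PySem.Set.ofList blocked).countP
        (fun z => decide (z.1 = bx ∧ min y b_y ≤ z.2 ∧ z.2 ≤ max y b_y ∧ z.2 ≠ y)) := by
    have hCn : (((pathCells y sy ny)).map (fun c => (bx, c))).Nodup :=
      hnodupy.map (fun c₁ c₂ h => by simpa using congrArg Prod.snd h)
    have hmemC : ∀ z : Int × Int, z ∈ (pathCells y sy ny).map (fun c => (bx, c)) ↔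
        (z.1 = bx ∧ min y b_y ≤ z.2 ∧ z.2 ≤ max y b_y ∧ z.2 ≠ y) := by
      rintro ⟨zx, zy⟩
      simp only [List.mem_map, Prod.mk.injEq]
      constructor
      · rintro ⟨c, hc, h1, h2⟩
        subst h1; subst h2
        exact ⟨rfl, (hmemy c).mp hc⟩
      · rintro ⟨h1, h2⟩
        exact ⟨zy, (hmemy zy).mpr h2, h1.symm, rfl⟩
    have hmap : (pathCells y sy ny).countP (fun c => decide ((bx, c) ∈ blocked)) =
        ((pathCells y sy ny).map (fun c => (bx, c))).countP (fun z => decide (z ∈ blocked)) := by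
      rw [List.countP_map]; rfl
    rw [hmap]
    have hright : (PySem.Set.ofList blocked).countP
        (fun z => decide (z.1 = bx ∧ min y b_y ≤ z.2 ∧ z.2 ≤ max y b_y ∧ z.2 ≠ y)) =
        ((PySem.Set.ofList blocked).toFinset ∩
          ((pathCells y sy ny).map (fun c => (bx, c))).toFinset).card := by
      refine (countP_iff_congr _ _ _ ?_).trans
        (countP_mem_eq_card_inter (PySem.Set.ofList blocked)
          ((pathCells y sy ny).map (fun c => (bx, c))) (PySem.Set.nodup_ofList _))
      intro z _
      simp only [decide_eq_true_eq]
      exact (hmemC z).symm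
    rw [hright, hDf, Finset.inter_comm]
    refine (countP_iff_congr _ _ _ ?_).trans
      (countP_mem_eq_card_inter _ blocked hCn)
    intro z _
    simp only [decide_eq_true_eq]
  rw [hH, hV]
  push_cast
  ring

-- ===== VERDICT (by name: the statement is the Claim_ definition above) =====
theorem blocked_crossings_spec : Claim_equal_blocked_crossings := by
  intro a b blocked _
  exact blocked_crossings_spec_aux a b blocked
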